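-- pv_equiv track=rewrite | github.com/ArshiaRx/Computer-Science-I | labs109.py | spread_the_coins
-- ===== SOURCE A (Python) =====
-- def spread_the_coins(coins,left,right):
--
--     start, i = 0, 0                 #define two variable and set them two zero
--
--     while i <(len(coins)):
--       #while i is less than the ocins length do the following:
--
--
--         #define a variable that goes throguht every elements of coin and
--         #divide it by the sum of left and right
--         x = coins[i] // (left + right)
--
-- #if x is greater than zero, Remove extra coin from unstable piles
--         if x > 0:
--             #coins[i] = coins[i] - x * (lef + right)
--             coins[i] -= x* (left + right)
--
-- #if i element is not equal to the last coins element spread coing to right (if exist)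
--             if i != (len(coins) - 1):
--
--                 #coins[i + 1] = coins[i + 1] + x * right
--                 coins[i + 1] += x * right
--
-- #if i element is equal to the last element of coins append right spread to coins
--             elif i == (len(coins) - 1):
--                 coins.append(x * right)
--
-- #if i is not equal to zero, spread to left (if exist) and then decrement from i element
--             if i != 0:
--
--                 #coins[i -1] = coins[i -1] + x * left
--                 coins[i - 1] += x * left
--                 i -= 1
--                 continue                    #continue from left spread
--
-- #if i is equal to zero, decrement from start
--             else:
--                 start -= 1
-- #insert = insert the 2nd parameter, to the first parameter which is a index psotion
--                 coins.insert(0, x * left)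
--                 continue                    #continue from left spread
--         i += 1       #i = i + 1, while all condition are met incremeent i by 1
--
--     return(start, coins)   #return starts and coins
-- ===== SOURCE B (Python) =====
-- # Zipper/two-stack reformulation: same spreading process, but the cursor walk is
-- # O(1) pops/pushes instead of list indexing and front insertion. Mutates `coins`
-- # in place (coins[:] = ...) exactly like the original.
-- def spread_the_coins(coins, left, right):
--     s = left + right
--     start = 0
--     before = []                 # settled cells left of the cursor (top of stack = nearest)
--     after = coins[::-1]         # pending cells; cursor cell on top
--     while after:
--         c = after.pop()
--         x = c // s
--         if x > 0:
--             c -= x * s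
--             if after:
--                 after[-1] += x * right      # spread right to the next pending cell
--             else:
--                 after.append(x * right)     # grow the line on the right
--             after.append(c)                 # residue stays, revisited later
--             if before:
--                 after.append(before.pop() + x * left)   # step left onto the neighbour
--             else:
--                 start -= 1
--                 after.append(x * left)      # grow the line on the left
--         else:
--             before.append(c)
--     coins[:] = before
--     return (start, coins)
-- ===== Notes on version B (the rewrite author's own statement) =====
-- stated objective: alternative
-- what changed: The index-juggling while loop over one list (with O(n) coins.insert(0,..) on every leftward overflow and i arithmetic) is replaced by a zipper of two stacks - settled cells left of the cursor and pending cells - where firing, moving left and moving right are O(1) pops/pushes; the same in-place result list is rebuilt at the end.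
-- outside the precondition, e.g. on spread_the_coins([-27, 10], 4, -1): A returns (0, [-15, 1, -3]), B returns (0, [-15, 1, -3])
import Mathlib
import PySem

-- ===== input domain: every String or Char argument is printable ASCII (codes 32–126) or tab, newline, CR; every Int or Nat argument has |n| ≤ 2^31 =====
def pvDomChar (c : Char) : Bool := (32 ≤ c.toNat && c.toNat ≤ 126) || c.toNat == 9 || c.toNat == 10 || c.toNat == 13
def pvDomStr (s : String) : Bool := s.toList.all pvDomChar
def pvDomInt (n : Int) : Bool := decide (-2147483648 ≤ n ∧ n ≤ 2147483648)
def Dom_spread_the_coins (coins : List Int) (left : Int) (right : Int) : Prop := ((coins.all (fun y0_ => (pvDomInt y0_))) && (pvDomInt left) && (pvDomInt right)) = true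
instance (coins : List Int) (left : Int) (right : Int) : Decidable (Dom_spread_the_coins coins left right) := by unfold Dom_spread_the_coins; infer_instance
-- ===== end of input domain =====

-- B replaces the index-juggling single-list loop (O(n) front inserts) by a zipper of two
-- stacks with O(1) pops/pushes; both versions mutate the Python argument list in place, the
-- equivalence proved here is about the returned (start, coins) value.

-- ===== PORT A =====
-- Python's while loop becomes fuel recursion (the loop has no structural measure; Python A
-- diverges outside Pre_). Python's i stays ≥ 0 throughout (i -= 1 only under i != 0), so it
-- is carried as a Nat; reads coins[i] happen only under i < len(coins), so getD is exact.
def pvFuelA : Nat := 18446744073709551616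

def spreadLoopA (fuel : Nat) (start : Int) (i : Nat) (coins : List Int) (left right : Int) :
    Int × List Int :=
  match fuel with
  | 0 => (start, coins)
  | f + 1 =>
    if i < coins.length then
      let c0 := coins.getD i 0
      let x := PySem.Int.floordiv c0 (left + right)
      if x > 0 then
        let coins1 := coins.set i (c0 - x * (left + right))
        -- `if i != len(coins) - 1 … elif i == len(coins) - 1 …` (the elif is the complement)
        let coins2 :=
          if i ≠ coins1.length - 1 then
            coins1.set (i + 1) (coins1.getD (i + 1) 0 + x * right)
          else coins1 ++ [x * right]
        if i ≠ 0 then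
          spreadLoopA f start (i - 1) (coins2.set (i - 1) (coins2.getD (i - 1) 0 + x * left))
            left right
        else
          spreadLoopA f (start - 1) 0 ((x * left) :: coins2) left right
      else spreadLoopA f start (i + 1) coins left right
    else (start, coins)

def spread_the_coins (coins : List Int) (left : Int) (right : Int) : Int × List Int :=
  spreadLoopA pvFuelA 0 0 coins left right

-- ===== PORT B =====
-- Source B's stacks `before`/`after` (top = Python list end) are Lean lists with head = top.
-- Same fuel device for the while loop; at fuel 0 it returns the current line re-assembled.
def spreadLoopB (fuel : Nat) (start : Int) (before after : List Int) (left right : Int) :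
    Int × List Int :=
  match fuel with
  | 0 => (start, before.reverse ++ after)
  | f + 1 =>
    match after with
    | [] => (start, before.reverse)
    | c :: rest =>
      let x := PySem.Int.floordiv c (left + right)
      if x > 0 then
        let c' := c - x * (left + right)
        let rest' :=
          match rest with
          | [] => [x * right]
          | r :: rs => (r + x * right) :: rs
        match before with
        | [] => spreadLoopB f (start - 1) [] ((x * left) :: c' :: rest') left right
        | b :: bs => spreadLoopB f start bs ((b + x * left) :: c' :: rest') left right
      else spreadLoopB f start (c :: before) rest left right

def spread_the_coins_alt (coins : List Int) (left : Int) (right : Int) : Int × List Int :=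
  spreadLoopB pvFuelA 0 [] coins left right

-- ===== PRECONDITION & SPEC =====
-- Pre_ excludes left + right = 0 (Python raises ZeroDivisionError) and the mixed/zero-sign
-- share settings on unstable input, where the spilled pile recreates an unstable pile and A
-- loops forever; a few such mixed-sign inputs do stabilize and are conservatively excluded
-- too (see cites; A and B agree there as well).
def Pre_spread_the_coins (coins : List Int) (left : Int) (right : Int) : Prop :=
  (1 ≤ left ∧ 1 ≤ right) ∨ (left ≤ -1 ∧ right ≤ -1) ∨
    (left + right ≠ 0 ∧ ∀ c ∈ coins, PySem.Int.floordiv c (left + right) ≤ 0)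

instance (coins : List Int) (left : Int) (right : Int) :
    Decidable (Pre_spread_the_coins coins left right) := by
  unfold Pre_spread_the_coins; infer_instance

def pvWitness_spread_the_coins : List Int × Int × Int := ([5, 1], 1, 1)

def Spec_spread_the_coins (coins : List Int) (left : Int) (right : Int) (out : Int × List Int) : Prop := out = spread_the_coins_alt coins left right
instance (coins : List Int) (left : Int) (right : Int) (out : Int × List Int) : Decidable (Spec_spread_the_coins coins left right out) := by unfold Spec_spread_the_coins; infer_instance

-- ===== CLAIM (what is proved, stated in full; the proofs are below) =====
def Claim_equal_spread_the_coins : Prop := ∀ (coins : List Int) (left : Int) (right : Int), Dom_spread_the_coins coins left right → Pre_spread_the_coins coins left right → Spec_spread_the_coins coins left right (spread_the_coins coins left right)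

-- ===== LEMMAS AND PROOFS =====

-- set/getD at the junction of an append, the only list surgery the simulation needs
theorem pvGetD_mid (l r : List Int) (x : Int) : (l ++ x :: r).getD l.length 0 = x := by
  induction l with
  | nil => rfl
  | cons a l ih => simpa using ih

theorem pvSet_mid (l r : List Int) (x y : Int) : (l ++ x :: r).set l.length y = l ++ y :: r := by
  induction l with
  | nil => rfl
  | cons a l ih => simp [ih]

-- Lockstep simulation: A's state (coins, i) corresponds to B's zipper (before, after) via
-- coins = before.reverse ++ after, i = before.length; both loops take identical steps.
theorem pvSim (fuel : Nat) : ∀ (start : Int) (before after : List Int) (left right : Int),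
    spreadLoopA fuel start before.length (before.reverse ++ after) left right =
      spreadLoopB fuel start before after left right := by
  induction fuel with
  | zero => intro start before after left right; rfl
  | succ f ih =>
    intro start before after left right
    cases after with
    | nil => simp [spreadLoopA, spreadLoopB]
    | cons c rest =>
      have hlen : before.length < (before.reverse ++ c :: rest).length := by simp
      have hget : (before.reverse ++ c :: rest).getD before.length 0 = c := by
        have h := pvGetD_mid before.reverse rest c
        rwa [List.length_reverse] at h
      simp only [spreadLoopA, spreadLoopB]
      rw [if_pos hlen, hget]
      by_cases hxpos : PySem.Int.floordiv c (left + right) > 0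
      · rw [if_pos hxpos, if_pos hxpos]
        set x := PySem.Int.floordiv c (left + right) with hx
        have hset1 : (before.reverse ++ c :: rest).set before.length
            (c - x * (left + right)) = before.reverse ++ (c - x * (left + right)) :: rest := by
          have h := pvSet_mid before.reverse rest c (c - x * (left + right))
          rwa [List.length_reverse] at h
        rw [hset1]
        set c' := c - x * (left + right) with hc'
        cases rest with
        | nil =>
          have hlast : ¬ before.length ≠ (before.reverse ++ [c']).length - 1 := by simp
          rw [if_neg hlast]
          have hco2 : before.reverse ++ [c'] ++ [x * right] =
              before.reverse ++ [c', x * right] := by simp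
          rw [hco2]
          cases before with
          | nil =>
            rw [if_neg (by simp : ¬ (([] : List Int).length ≠ 0))]
            simpa using ih (start - 1) [] [x * left, c', x * right] left right
          | cons b bs =>
            rw [if_pos (by simp : (b :: bs).length ≠ 0)]
            have hl1 : (b :: bs).length - 1 = bs.length := by simp
            have ha : (b :: bs).reverse ++ [c', x * right] =
                bs.reverse ++ [b, c', x * right] := by simp
            rw [ha, hl1]
            have hgb := pvGetD_mid bs.reverse [c', x * right] b
            have hsb := pvSet_mid bs.reverse [c', x * right] b (b + x * left)
            simp only [List.length_reverse] at hgb hsb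
            rw [hgb, hsb]
            simpa using ih start bs [b + x * left, c', x * right] left right
        | cons r rs =>
          have hmid : before.length ≠ (before.reverse ++ c' :: r :: rs).length - 1 := by
            simp
          rw [if_pos hmid]
          have hg1 : (before.reverse ++ c' :: r :: rs).getD (before.length + 1) 0 = r := by
            have := pvGetD_mid (before.reverse ++ [c']) rs r
            simpa using this
          have hs1 : (before.reverse ++ c' :: r :: rs).set (before.length + 1)
              (r + x * right) = before.reverse ++ c' :: (r + x * right) :: rs := by
            have := pvSet_mid (before.reverse ++ [c']) rs r (r + x * right)
            simpa using this
          rw [hg1, hs1]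
          cases before with
          | nil =>
            rw [if_neg (by simp : ¬ (([] : List Int).length ≠ 0))]
            simpa using ih (start - 1) [] (x * left :: c' :: (r + x * right) :: rs) left right
          | cons b bs =>
            rw [if_pos (by simp : (b :: bs).length ≠ 0)]
            have hl1 : (b :: bs).length - 1 = bs.length := by simp
            have ha : (b :: bs).reverse ++ c' :: (r + x * right) :: rs =
                bs.reverse ++ b :: (c' :: (r + x * right) :: rs) := by simp
            rw [ha, hl1]
            have hgb := pvGetD_mid bs.reverse (c' :: (r + x * right) :: rs) b
            have hsb := pvSet_mid bs.reverse (c' :: (r + x * right) :: rs) b (b + x * left)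
            simp only [List.length_reverse] at hgb hsb
            rw [hgb, hsb]
            simpa using ih start bs ((b + x * left) :: c' :: (r + x * right) :: rs) left right
      · rw [if_neg hxpos, if_neg hxpos]
        have h1 : before.reverse ++ c :: rest = (c :: before).reverse ++ rest := by simp
        have h2 : before.length + 1 = (c :: before).length := by simp
        rw [h1, h2]
        exact ih start (c :: before) rest left right

-- ===== VERDICT (by name: the statement is the Claim_ definition above) =====
theorem spread_the_coins_spec : Claim_equal_spread_the_coins := by
  intro coins left right _ _
  unfold Spec_spread_the_coins spread_the_coins spread_the_coins_alt
  simpa using pvSim pvFuelA 0 [] coins left right
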